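-- pv_equiv track=rewrite | github.com/kwimac/advent_of_code | 2024/day_1.py | task_2
-- ===== SOURCE A (Python) =====
-- from collections import Counter
--
-- def task_2(l1: list[int], l2: list[int]) -> int:
--     d1 = Counter(l1)
--     d2 = Counter(l2)
--     sum_ = 0
--     for k1, v1 in d1.items():
--         if k1 in d2:
--             sum_ += k1 * d2[k1] * v1
--     return sum_
-- ===== SOURCE B (Python) =====
-- def task_2(l1: list[int], l2: list[int]) -> int:
--     # map each value to the accumulated sum of its occurrences in l1 (= x * count1(x))
--     weights = {}
--     for x in l1:
--         weights[x] = weights.get(x, 0) + x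
--     total = 0
--     for y in l2:
--         total += weights.get(y, 0)
--     return total
-- ===== Notes on version B (the rewrite author's own statement) =====
-- stated objective: alternative
-- what changed: B builds no Counter at all: one pass over l1 accumulates, per value, the sum of its own occurrences (x*count1(x)) into a plain dict, then a second pass over the raw l2 just adds the looked-up weight, so no key iteration, no membership test and no multiplication in the summing loop.
import Mathlib
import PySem

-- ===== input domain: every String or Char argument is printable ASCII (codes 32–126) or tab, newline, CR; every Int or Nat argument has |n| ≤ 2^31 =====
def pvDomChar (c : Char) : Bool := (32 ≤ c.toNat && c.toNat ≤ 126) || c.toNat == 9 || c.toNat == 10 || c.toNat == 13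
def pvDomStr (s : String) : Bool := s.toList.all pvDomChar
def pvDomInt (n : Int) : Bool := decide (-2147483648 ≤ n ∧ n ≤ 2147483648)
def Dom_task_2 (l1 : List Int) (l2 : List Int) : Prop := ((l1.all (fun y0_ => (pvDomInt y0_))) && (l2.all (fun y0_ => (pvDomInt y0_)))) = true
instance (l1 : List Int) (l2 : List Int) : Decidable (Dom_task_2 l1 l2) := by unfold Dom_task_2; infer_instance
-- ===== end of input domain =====

-- B drops both Counters: a dict accumulates, per value, the sum of its occurrences in l1,
-- and a raw pass over l2 adds the looked-up weights (alternative decomposition, same cost).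

-- ===== PORT A =====
def task_2 (l1 : List Int) (l2 : List Int) : Int :=
  let d1 := PySem.Dict.counter l1
  let d2 := PySem.Dict.counter l2
  d1.items.foldl (fun sum_ kv =>
    if d2.contains kv.1 then sum_ + kv.1 * d2.getD kv.1 0 * kv.2 else sum_) 0

-- ===== PORT B =====
def task_2_alt (l1 : List Int) (l2 : List Int) : Int :=
  let weights := l1.foldl (fun d x => d.insert x (d.getD x 0 + x)) (PySem.Dict.empty)
  l2.foldl (fun total y => total + weights.getD y 0) 0

-- ===== PRECONDITION & SPEC =====
def Spec_task_2 (l1 : List Int) (l2 : List Int) (out : Int) : Prop := out = task_2_alt l1 l2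
instance (l1 : List Int) (l2 : List Int) (out : Int) : Decidable (Spec_task_2 l1 l2 out) := by unfold Spec_task_2; infer_instance

-- ===== CLAIM (what is proved, stated in full; the proofs are below) =====
def Claim_equal_task_2 : Prop := ∀ (l1 : List Int) (l2 : List Int), Dom_task_2 l1 l2 → Spec_task_2 l1 l2 (task_2 l1 l2)

-- ===== LEMMAS AND PROOFS =====

-- the accumulated weight of k after the l1-pass is k * (number of occurrences of k)
theorem pv_weights_getD (k : Int) :
    ∀ (l : List Int) (d : PySem.Dict Int Int),
      (l.foldl (fun d x => d.insert x (d.getD x 0 + x)) d).getD k 0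
        = d.getD k 0 + k * (l.count k : Int) := by
  intro l
  induction l with
  | nil => intro d; simp
  | cons a t ih =>
    intro d
    rw [List.foldl_cons, ih, PySem.Dict.getD_insert]
    by_cases h : k = a
    · subst h; simp; ring
    · have hb : (a == k) = false := beq_eq_false_iff_ne.mpr (fun he => h he.symm)
      simp [h, List.count_cons, hb]

-- splitting a mapped sum at one value: the copies of k contribute (count k)·(g k)
theorem pv_sum_split (g : Int → Int) (k : Int) (l : List Int) :
    (l.map g).sum = (l.count k : Int) * g k + ((l.filter (fun x => !(x == k))).map g).sum := by
  induction l with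
  | nil => simp
  | cons a t ih =>
    by_cases h : a = k
    · subst h
      simp [ih]
      ring
    · have hb : (a == k) = false := by simp [h]
      simp [List.count_cons, hb, ih]
      ring

-- weighted sum over nodup keys covering (up to zero weights) l equals the plain sum over l
theorem pv_weighted_sum (g : Int → Int) :
    ∀ (ks l : List Int), ks.Nodup → (∀ x ∈ l, x ∈ ks ∨ g x = 0) →
      (ks.map (fun k => g k * (l.count k : Int))).sum = (l.map g).sum := by
  intro ks
  induction ks with
  | nil =>
    intro l _ hcov
    have : (l.map g).sum = 0 := by
      apply List.sum_eq_zero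
      intro y hy
      rcases List.mem_map.mp hy with ⟨x, hx, rfl⟩
      rcases hcov x hx with h | h
      · exact absurd h (List.not_mem_nil)
      · exact h
    simp [this]
  | cons k ks ih =>
    intro l hnd hcov
    have hk : k ∉ ks := (List.nodup_cons.mp hnd).1
    have hnd' : ks.Nodup := (List.nodup_cons.mp hnd).2
    set l' := l.filter (fun x => !(x == k)) with hl'
    have hcov' : ∀ x ∈ l', x ∈ ks ∨ g x = 0 := by
      intro x hx
      have hxl : x ∈ l := List.mem_of_mem_filter hx
      have hxk : ¬(x = k) := by
        have := List.of_mem_filter hx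
        simpa using this
      rcases hcov x hxl with h | h
      · rcases List.mem_cons.mp h with h' | h'
        · exact absurd h' hxk
        · exact Or.inl h'
      · exact Or.inr h
    have hcnt : ∀ k' ∈ ks, l'.count k' = l.count k' := by
      intro k' hk'
      have hne : k' ≠ k := by rintro rfl; exact hk hk'
      rw [hl', List.count_filter]
      simp [hne]
    have hmap : ks.map (fun k' => g k' * (l.count k' : Int))
        = ks.map (fun k' => g k' * (l'.count k' : Int)) := by
      apply List.map_congr_left
      intro k' hk'
      rw [hcnt k' hk']
    rw [List.map_cons, List.sum_cons, hmap, ih l' hnd' hcov', pv_sum_split g k l]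
    ring

-- ===== VERDICT (by name: the statement is the Claim_ definition above) =====
theorem task_2_spec : Claim_equal_task_2 := by
  intro l1 l2 _
  unfold Spec_task_2 task_2 task_2_alt
  simp only [PySem.Dict.items_counter, List.foldl_map]
  -- A's side: fold over the unique keys of l1
  have hstep : ∀ (acc k : Int), k ∈ PySem.Set.ofList l1 →
      (if (PySem.Dict.counter l2).contains k = true
        then acc + k * (PySem.Dict.counter l2).getD k 0 * ((l1.count k : Int))
        else acc)
      = acc + (k * (l1.count k : Int)) * ((l2.count k : Int)) := by
    intro acc k _
    by_cases h : (PySem.Dict.counter l2).contains k = true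
    · simp [h, PySem.Dict.getD_counter]; ring
    · have hc : l2.count k = 0 := by
        have hcc := PySem.Dict.contains_counter (xs := l2) (v := k)
        simp only [Bool.not_eq_true] at h
        rw [hcc] at h
        simpa [List.count_eq_zero] using h
      simp [h, hc]
  rw [PySem.List.foldl_congr_mem
      (f := fun acc k => if (PySem.Dict.counter l2).contains k = true
        then acc + k * (PySem.Dict.counter l2).getD k 0 * ((l1.count k : Int))
        else acc)
      (g := fun acc k => acc + (k * (l1.count k : Int)) * ((l2.count k : Int)))
      (init := 0) (l := PySem.Set.ofList l1) hstep]
  rw [PySem.List.foldl_add (g := fun k => (k * (l1.count k : Int)) * ((l2.count k : Int)))]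
  -- B's side: weights.getD y 0 = y * count of y in l1
  have hB : ∀ (acc y : Int), y ∈ l2 →
      (acc + (l1.foldl (fun d x => d.insert x (d.getD x 0 + x)) (PySem.Dict.empty)).getD y 0)
      = acc + y * (l1.count y : Int) := by
    intro acc y _
    rw [pv_weights_getD]
    simp
  rw [PySem.List.foldl_congr_mem
      (f := fun acc y => acc + (l1.foldl (fun d x => d.insert x (d.getD x 0 + x)) (PySem.Dict.empty)).getD y 0)
      (g := fun acc y => acc + y * (l1.count y : Int))
      (init := 0) (l := l2) hB]
  rw [PySem.List.foldl_add (g := fun y => y * (l1.count y : Int))]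
  simp only [zero_add]
  exact pv_weighted_sum (fun x => x * (l1.count x : Int)) (PySem.Set.ofList l1) l2
    (PySem.Set.nodup_ofList l1)
    (by intro x _
        by_cases h : x ∈ l1
        · exact Or.inl ((PySem.Set.mem_ofList l1 x).mpr h)
        · exact Or.inr (by simp [List.count_eq_zero_of_not_mem h]))
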